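-- pv_equiv track=rewrite | github.com/MrIbrahem/WikiData-Dumps | claims/do_text.py | make_numbers_section
-- ===== SOURCE A (Python) =====
-- def make_numbers_section(p31list):
--     xline = ""
--     yline = ""
--     # ---
--     rows = []
--     # ---
--     property_other = 0
--     # ---
--     n = 0
--     # ---
--     for Len, P in p31list:
--         n += 1
--         if n < 27:
--             xline += f",{P}"
--             yline += f",{Len}"
--         # ---
--         if len(rows) < 101:
--             Len = f"{Len:,}"
--             P = "{{P|%s}}" % P
--             lune = f"| {n} || {P} || {Len} "
--             rows.append(lune)
--         else:
--             property_other += int(Len)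
--     Chart2 = "{| class='floatright sortable' \n|-\n|" + "{{Graph:Chart|width=900|height=100|xAxisTitle=property|yAxisTitle=usage|type=rect\n"
--     Chart2 += f"|x={xline}\n|y1={yline}"
--     Chart2 += "\n}}"
--     Chart2 += "\n|-\n|}"
--     # ---
--     Chart2 = Chart2.replace("=,", "=")
--     # ---
--     rows.append(f"! {n} \n! others \n! {property_other:,}")
--     rows = "\n|-\n".join(rows)
--     table = "\n{| " + f'class="wikitable sortable"\n|-\n! #\n! property\n! usage\n|-\n{rows}\n' + "|}"
--     return f"== Numbers ==\n\n{Chart2}\n{table}"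
-- ===== SOURCE B (Python) =====
-- def make_numbers_section(p31list):
--     n = len(p31list)
--     head = p31list[:26]
--     xline = "".join(f",{P}" for _, P in head)
--     yline = "".join(f",{Len}" for Len, _ in head)
--     rows = [f"| {i} || {{{{P|{P}}}}} || {Len:,} "
--             for i, (Len, P) in enumerate(p31list[:101], start=1)]
--     property_other = sum(Len for Len, _ in p31list[101:])
--     Chart2 = ("{| class='floatright sortable' \n|-\n|"
--               "{{Graph:Chart|width=900|height=100|xAxisTitle=property|yAxisTitle=usage|type=rect\n"
--               f"|x={xline}\n|y1={yline}\n}}}}\n|-\n|}}")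
--     Chart2 = Chart2.replace("=,", "=")
--     rows.append(f"! {n} \n! others \n! {property_other:,}")
--     body = "\n|-\n".join(rows)
--     table = "\n{| " + f'class="wikitable sortable"\n|-\n! #\n! property\n! usage\n|-\n{body}\n' + "|}"
--     return f"== Numbers ==\n\n{Chart2}\n{table}"
-- ===== Notes on version B (the rewrite author's own statement) =====
-- stated objective: simpler
-- what changed: A's single fused loop carrying five pieces of mutable state (counter, two chart lines, capped row list, overflow sum) is replaced by independent bounded passes over slices: n = len(p31list), joins over p31list[:26] for the chart axes, a comprehension over enumerate(p31list[:101]) for the rows, and a sum over p31list[101:] for the 'others' total.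
import Mathlib
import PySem

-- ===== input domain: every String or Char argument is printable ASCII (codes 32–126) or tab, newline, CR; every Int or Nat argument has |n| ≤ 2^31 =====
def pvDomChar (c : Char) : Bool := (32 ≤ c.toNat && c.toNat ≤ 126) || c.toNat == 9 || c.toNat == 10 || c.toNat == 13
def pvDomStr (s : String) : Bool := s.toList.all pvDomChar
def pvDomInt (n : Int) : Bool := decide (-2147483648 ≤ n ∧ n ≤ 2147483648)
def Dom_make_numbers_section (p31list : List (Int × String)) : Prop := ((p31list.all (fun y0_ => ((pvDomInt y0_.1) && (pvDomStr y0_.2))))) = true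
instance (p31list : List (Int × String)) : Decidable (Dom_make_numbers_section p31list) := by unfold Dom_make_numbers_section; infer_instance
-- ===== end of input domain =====

-- B replaces A's fused five-state loop by independent bounded passes over slices ([:26], [:101], [101:]); objective: simpler.


-- ===== PORT A =====
-- shared formatting helper: Python's f"{n:,}" (thousands separators), used by both Pythons
def pvCommaGroup : List Char → Nat → List Char
  | [], _ => []
  | c :: cs, k => if k = 3 then ',' :: c :: pvCommaGroup cs 1 else c :: pvCommaGroup cs (k + 1)

def pvFmtComma (n : Int) : String :=
  let s := String.ofList ((pvCommaGroup (PySem.Int.toChars (n.natAbs : Int)).reverse 0).reverse)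
  if n < 0 then "-" ++ s else s

-- A's f"| {n} || {P} || {Len} " with P and Len already formatted
def pvRowA (i len : Int) (P : String) : String :=
  "| " ++ PySem.Int.toStr i ++ " || " ++ ("{{P|" ++ P ++ "}}") ++ " || " ++ pvFmtComma len ++ " "

-- one iteration of A's for-loop over state (n, xline, yline, rows, property_other)
def pvStepA (st : Int × String × String × List String × Int) (p : Int × String) :
    Int × String × String × List String × Int :=
  match st, p with
  | (n, x, y, rows, other), (len, P) =>
    let n := n + 1
    let xy := if n < 27 then (x ++ ("," ++ P), y ++ ("," ++ PySem.Int.toStr len)) else (x, y)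
    if rows.length < 101 then
      (n, xy.1, xy.2, rows ++ [pvRowA n len P], other)
    else
      (n, xy.1, xy.2, rows, other + len)

def make_numbers_section (p31list : List (Int × String)) : String :=
  match p31list.foldl pvStepA (0, "", "", ([] : List String), 0) with
  | (n, xline, yline, rows, property_other) =>
    let chart2 := "{| class='floatright sortable' \n|-\n|" ++ "{{Graph:Chart|width=900|height=100|xAxisTitle=property|yAxisTitle=usage|type=rect\n"
    let chart2 := chart2 ++ ("|x=" ++ xline ++ "\n|y1=" ++ yline)
    let chart2 := chart2 ++ "\n}}"
    let chart2 := chart2 ++ "\n|-\n|}"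
    let chart2 := PySem.Str.replace chart2 "=," "="
    let rows := rows ++ ["! " ++ PySem.Int.toStr n ++ " \n! others \n! " ++ pvFmtComma property_other]
    let rowsS := PySem.Str.join "\n|-\n" rows
    let table := "\n{| " ++ ("class=\"wikitable sortable\"\n|-\n! #\n! property\n! usage\n|-\n" ++ rowsS ++ "\n") ++ "|}"
    "== Numbers ==\n\n" ++ chart2 ++ "\n" ++ table

-- ===== PORT B =====
-- B's f"| {i} || {{{{P|{P}}}}} || {Len:,} "
def pvRowB (i len : Int) (P : String) : String :=
  "| " ++ PySem.Int.toStr i ++ " || {{P|" ++ P ++ "}} || " ++ pvFmtComma len ++ " "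

def make_numbers_section_alt (p31list : List (Int × String)) : String :=
  let n : Int := p31list.length
  let head := PySem.List.slice p31list none (some 26)
  let xline := PySem.Str.join "" (head.map (fun p => "," ++ p.2))
  let yline := PySem.Str.join "" (head.map (fun p => "," ++ PySem.Int.toStr p.1))
  let rows := (PySem.List.enumerate (PySem.List.slice p31list none (some 101)) 1).map
      (fun q => pvRowB q.1 q.2.1 q.2.2)
  let property_other := ((PySem.List.slice p31list (some 101) none).map (·.1)).foldl (· + ·) 0
  let chart2 := PySem.Str.replace
      ("{| class='floatright sortable' \n|-\n|{{Graph:Chart|width=900|height=100|xAxisTitle=property|yAxisTitle=usage|type=rect\n|x="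
        ++ xline ++ "\n|y1=" ++ yline ++ "\n}}\n|-\n|}") "=," "="
  let body := PySem.Str.join "\n|-\n"
      (rows ++ ["! " ++ PySem.Int.toStr n ++ " \n! others \n! " ++ pvFmtComma property_other])
  let table := "\n{| " ++ ("class=\"wikitable sortable\"\n|-\n! #\n! property\n! usage\n|-\n" ++ body ++ "\n") ++ "|}"
  "== Numbers ==\n\n" ++ chart2 ++ "\n" ++ table

-- ===== PRECONDITION & SPEC =====
def Spec_make_numbers_section (p31list : List (Int × String)) (out : String) : Prop := out = make_numbers_section_alt p31list
instance (p31list : List (Int × String)) (out : String) : Decidable (Spec_make_numbers_section p31list out) := by unfold Spec_make_numbers_section; infer_instance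

-- ===== CLAIM (what is proved, stated in full; the proofs are below) =====
def Claim_equal_make_numbers_section : Prop := ∀ (p31list : List (Int × String)), Dom_make_numbers_section p31list → Spec_make_numbers_section p31list (make_numbers_section p31list)

-- ===== LEMMAS AND PROOFS =====
theorem pvStrExt {a b : String} (h : a.toList = b.toList) : a = b := by
  have := congrArg String.ofList h
  simpa using this

theorem pvJoinEmptyNil : PySem.Str.join "" ([] : List String) = "" := by decide

theorem pvJoinEmptyCons (a : String) (rest : List String) :
    PySem.Str.join "" (a :: rest) = a ++ PySem.Str.join "" rest := by
  cases rest with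
  | nil => simp [PySem.Str.join, PySem.Chars.join, List.intercalate]
  | cons b t => simp [PySem.Str.join, PySem.Chars.join, List.intercalate]

theorem pvSumShift (xs : List Int) (a b : Int) :
    xs.foldl (· + ·) (a + b) = a + xs.foldl (· + ·) b := by
  induction xs generalizing b with
  | nil => rfl
  | cons c t ih => simp only [List.foldl_cons, add_assoc, ih]

theorem pvRow_eq (i len : Int) (P : String) : pvRowA i len P = pvRowB i len P := by
  apply pvStrExt; simp [pvRowA, pvRowB]

theorem pvLoop (l : List (Int × String)) (n0 : Int) (h : 0 ≤ n0)
    (x0 y0 : String) (r0 : List String) (o0 : Int) :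
    l.foldl pvStepA (n0, x0, y0, r0, o0) =
      ( n0 + l.length,
        x0 ++ PySem.Str.join "" ((l.take (26 - n0).toNat).map fun p => "," ++ p.2),
        y0 ++ PySem.Str.join "" ((l.take (26 - n0).toNat).map fun p => "," ++ PySem.Int.toStr p.1),
        r0 ++ (PySem.List.enumerate (l.take (101 - r0.length)) (n0 + 1)).map
          (fun q => pvRowA q.1 q.2.1 q.2.2),
        o0 + ((l.drop (101 - r0.length)).map (·.1)).foldl (· + ·) 0 ) := by
  induction l generalizing n0 x0 y0 r0 o0 with
  | nil =>
      simp [pvJoinEmptyNil]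
  | cons a t ih =>
      simp only [List.foldl_cons]
      by_cases h26 : n0 < 26
      · have ht : (26 - n0).toNat = (26 - (n0 + 1)).toNat + 1 := by omega
        by_cases h101 : r0.length < 101
        · have hr : 101 - r0.length = (101 - (r0.length + 1)) + 1 := by omega
          rw [show pvStepA (n0, x0, y0, r0, o0) a =
              (n0 + 1, x0 ++ ("," ++ a.2), y0 ++ ("," ++ PySem.Int.toStr a.1),
               r0 ++ [pvRowA (n0 + 1) a.1 a.2], o0) by
            simp [pvStepA, h101, show n0 + 1 < 27 by omega]]
          rw [ih _ (by omega)]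
          refine Prod.ext ?_ (Prod.ext ?_ (Prod.ext ?_ (Prod.ext ?_ ?_))) <;>
            simp [ht, hr, PySem.List.enumerate_cons]
          · omega
          · rw [pvJoinEmptyCons, String.append_assoc]
          · rw [pvJoinEmptyCons, String.append_assoc]
        · have hr : 101 - r0.length = 0 := by omega
          rw [show pvStepA (n0, x0, y0, r0, o0) a =
              (n0 + 1, x0 ++ ("," ++ a.2), y0 ++ ("," ++ PySem.Int.toStr a.1),
               r0, o0 + a.1) by
            simp [pvStepA, h101, show n0 + 1 < 27 by omega]]
          rw [ih _ (by omega)]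
          refine Prod.ext ?_ (Prod.ext ?_ (Prod.ext ?_ (Prod.ext ?_ ?_))) <;> simp [hr, ht]
          · omega
          · rw [pvJoinEmptyCons, String.append_assoc]
          · rw [pvJoinEmptyCons, String.append_assoc]
          · have hs := pvSumShift (t.map (·.1)) a.1 0
            simp only [add_zero] at hs
            rw [hs, ← add_assoc]
      · have ht : (26 - n0).toNat = 0 := by omega
        have ht' : (26 - (n0 + 1)).toNat = 0 := by omega
        by_cases h101 : r0.length < 101
        · have hr : 101 - r0.length = (101 - (r0.length + 1)) + 1 := by omega
          rw [show pvStepA (n0, x0, y0, r0, o0) a =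
              (n0 + 1, x0, y0, r0 ++ [pvRowA (n0 + 1) a.1 a.2], o0) by
            simp [pvStepA, h101, show ¬ (n0 + 1 < 27) by omega]]
          rw [ih _ (by omega)]
          refine Prod.ext ?_ (Prod.ext ?_ (Prod.ext ?_ (Prod.ext ?_ ?_))) <;>
            simp [ht, ht', hr, PySem.List.enumerate_cons]
          omega
        · have hr : 101 - r0.length = 0 := by omega
          rw [show pvStepA (n0, x0, y0, r0, o0) a =
              (n0 + 1, x0, y0, r0, o0 + a.1) by
            simp [pvStepA, h101, show ¬ (n0 + 1 < 27) by omega]]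
          rw [ih _ (by omega)]
          refine Prod.ext ?_ (Prod.ext ?_ (Prod.ext ?_ (Prod.ext ?_ ?_))) <;> simp [hr, ht, ht']
          · omega
          · have hs := pvSumShift (t.map (·.1)) a.1 0
            simp only [add_zero] at hs
            rw [hs, ← add_assoc]

-- ===== VERDICT (by name: the statement is the Claim_ definition above) =====
theorem make_numbers_section_spec : Claim_equal_make_numbers_section := by
  intro l _
  unfold Spec_make_numbers_section make_numbers_section make_numbers_section_alt
  have e26 : PySem.List.slice l none (some (26 : Int)) = l.take 26 := by
    rw [PySem.List.slice_to l (by norm_num)]; congr 1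
  have e101 : PySem.List.slice l none (some (101 : Int)) = l.take 101 := by
    rw [PySem.List.slice_to l (by norm_num)]; congr 1
  have e101' : PySem.List.slice l (some (101 : Int)) none = l.drop 101 := by
    rw [PySem.List.slice_from l (by norm_num)]; congr 1
  rw [pvLoop l 0 le_rfl "" "" [] 0, e26, e101, e101']
  simp only [List.length_nil, Nat.sub_zero, Int.sub_zero, List.nil_append,
    zero_add]
  have hrow : (fun q : Int × Int × String => pvRowA q.1 q.2.1 q.2.2)
      = (fun q : Int × Int × String => pvRowB q.1 q.2.1 q.2.2) :=
    funext fun q => pvRow_eq q.1 q.2.1 q.2.2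
  rw [hrow]
  apply pvStrExt
  simp
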